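-- pv_equiv track=rewrite | github.com/huangdecai/suanfa | BaiJiaLe/main.py | cards_filter
-- ===== SOURCE A (Python) =====
-- def cards_filter(location, distance):  # 牌检测结果滤波
--     if len(location) == 0:
--         return 0
--     locList = [location[0][0]]
--     count = 1
--     for e in location:
--         flag = 1  # “是新的”标志
--         for have in locList:
--             if abs(e[0] - have) <= distance:
--                 flag = 0
--                 break
--         if flag:
--             count += 1
--             locList.append(e[0])
--     return count
-- ===== SOURCE B (Python) =====
-- def cards_filter(location, distance):  # same filter, centers kept sorted + binary search
--     if len(location) == 0:
--         return 0
--     centers = [location[0][0]]  # sorted ascending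
--     count = 1
--     for e in location:
--         x = e[0]
--         # hand-rolled bisect_left (module uses no imports)
--         lo, hi = 0, len(centers)
--         while lo < hi:
--             mid = (lo + hi) // 2
--             if centers[mid] < x:
--                 lo = mid + 1
--             else:
--                 hi = mid
--         near = (lo < len(centers) and centers[lo] - x <= distance) or \
--                (lo > 0 and x - centers[lo - 1] <= distance)
--         if not near:
--             centers.insert(lo, x)
--             count += 1
--     return count
-- ===== Notes on version B (the rewrite author's own statement) =====
-- stated objective: alternative
-- what changed: the inner linear scan over accepted centers is replaced by keeping the centers sorted and binary-searching for the insertion point (only its two neighbours can be within the distance threshold); Pre_ excludes only inputs with an empty inner list, where both A and B raise IndexError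
import Mathlib
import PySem

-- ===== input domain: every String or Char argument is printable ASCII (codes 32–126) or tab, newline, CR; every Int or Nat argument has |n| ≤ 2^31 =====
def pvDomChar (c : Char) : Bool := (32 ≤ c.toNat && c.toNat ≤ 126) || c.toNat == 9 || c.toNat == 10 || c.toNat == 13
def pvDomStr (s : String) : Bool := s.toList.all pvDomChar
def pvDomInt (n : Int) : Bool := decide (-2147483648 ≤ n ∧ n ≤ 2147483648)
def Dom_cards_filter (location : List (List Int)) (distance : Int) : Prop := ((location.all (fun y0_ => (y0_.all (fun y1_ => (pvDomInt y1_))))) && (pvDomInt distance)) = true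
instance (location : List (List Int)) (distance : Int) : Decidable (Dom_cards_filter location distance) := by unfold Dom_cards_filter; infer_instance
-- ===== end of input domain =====

-- B replaces A's inner linear scan over accepted centers by a sorted center list with binary search.

-- ===== PORT A =====
-- inner 'for have in locList: if abs(e[0]-have) <= distance: flag=0; break' — true = flag stayed 1
def cfScan (x : Int) (distance : Int) : List Int → Bool
  | [] => true
  | h :: t => if |x - h| ≤ distance then false else cfScan x distance t

def cards_filter (location : List (List Int)) (distance : Int) : Int :=
  if location.length = 0 then 0
  else
    -- e[0] / location[0][0] ported as pyGetD (always in range under Pre_cards_filter)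
    let st := location.foldl
      (fun (st : List Int × Int) e =>
        let x := PySem.List.pyGetD e 0 0
        if cfScan x distance st.1 then (st.1 ++ [x], st.2 + 1) else st)
      ([PySem.List.pyGetD (PySem.List.pyGetD location 0 []) 0 0], 1)
    st.2

-- ===== PORT B =====
-- Source B's hand-rolled 'lo, hi = 0, len(centers); while lo < hi: mid = (lo+hi)//2; …' is
-- exactly the loop PySem.List.bisectLeft performs, so it is ported as that function.
def cards_filter_alt (location : List (List Int)) (distance : Int) : Int :=
  if location.length = 0 then 0
  else
    let st := location.foldl
      (fun (st : List Int × Int) e =>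
        let x := PySem.List.pyGetD e 0 0
        let centers := st.1
        let i := PySem.List.bisectLeft centers x
        let near := (decide (i < centers.length) && decide (PySem.List.pyGetD centers (i : Int) 0 - x ≤ distance))
                 || (decide (0 < i) && decide (x - PySem.List.pyGetD centers ((i : Int) - 1) 0 ≤ distance))
        if near then st else (PySem.List.insert centers (i : Int) x, st.2 + 1))
      ([PySem.List.pyGetD (PySem.List.pyGetD location 0 []) 0 0], 1)
    st.2

-- ===== PRECONDITION & SPEC =====
-- Pre_ excludes exactly the inputs on which Python A raises IndexError: an empty inner list (e[0]).
def Pre_cards_filter (location : List (List Int)) (distance : Int) : Prop :=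
  ∀ e ∈ location, e ≠ []
instance (location : List (List Int)) (distance : Int) : Decidable (Pre_cards_filter location distance) := by unfold Pre_cards_filter; infer_instance
def pvWitness_cards_filter : List (List Int) × Int := ([[0], [5], [6]], 2)

def Spec_cards_filter (location : List (List Int)) (distance : Int) (out : Int) : Prop := out = cards_filter_alt location distance
instance (location : List (List Int)) (distance : Int) (out : Int) : Decidable (Spec_cards_filter location distance out) := by unfold Spec_cards_filter; infer_instance

-- ===== CLAIM (what is proved, stated in full; the proofs are below) =====
def Claim_equal_cards_filter : Prop := ∀ (location : List (List Int)) (distance : Int), Dom_cards_filter location distance → Pre_cards_filter location distance → Spec_cards_filter location distance (cards_filter location distance)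

-- ===== LEMMAS AND PROOFS =====

-- A's inner scan decides the existence of an accepted center within the distance threshold
theorem cfScan_eq_decide (x distance : Int) (l : List Int) :
    cfScan x distance l = !decide (∃ c ∈ l, |x - c| ≤ distance) := by
  induction l with
  | nil => simp [cfScan]
  | cons h t ih =>
      by_cases hc : |x - h| ≤ distance <;> simp [cfScan, hc, ih]

theorem sorted_getElem_le {l : List Int} (hs : List.Pairwise (· ≤ ·) l)
    {i j : Nat} (hij : i ≤ j) (hj : j < l.length) : l[i]'(by omega) ≤ l[j] := by
  rcases Nat.lt_or_ge i j with h | h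
  · exact List.pairwise_iff_getElem.mp hs i j (by omega) hj h
  · have : i = j := by omega
    subst this; exact le_refl _

-- B's two-neighbour test around the bisection point decides the same existence, on a sorted list
theorem near_eq_decide (x distance : Int) (l : List Int)
    (hs : List.Pairwise (· ≤ ·) l) :
    ((decide (PySem.List.bisectLeft l x < l.length) &&
        decide (PySem.List.pyGetD l ((PySem.List.bisectLeft l x : Nat) : Int) 0 - x ≤ distance))
     || (decide (0 < PySem.List.bisectLeft l x) &&
        decide (x - PySem.List.pyGetD l (((PySem.List.bisectLeft l x : Nat) : Int) - 1) 0 ≤ distance)))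
    = decide (∃ c ∈ l, |x - c| ≤ distance) := by
  obtain ⟨hle, hlt, hge⟩ := PySem.List.bisectLeft_spec l x hs
  set i := PySem.List.bisectLeft l x with hidef
  by_cases hex : ∃ c ∈ l, |x - c| ≤ distance
  · simp only [hex, decide_true]
    obtain ⟨c, hc, hcd⟩ := hex
    obtain ⟨j, hj, rfl⟩ := List.mem_iff_getElem.mp hc
    rw [Bool.or_eq_true]
    by_cases hjx : l[j] < x
    · -- the witness is left of x ⇒ the left neighbour l[i-1] is within distance
      right
      have hji : j < i := by
        by_contra hni
        exact absurd (hge j hj (Nat.le_of_not_lt hni)) (by omega)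
      have h0i : 0 < i := by omega
      have hi1 : i - 1 < l.length := by omega
      have hcle : l[j] ≤ l[i-1] := sorted_getElem_le hs (by omega) hi1
      have hlt1 : l[i-1] < x := hlt (i-1) hi1 (by omega)
      have habs : |x - l[j]| = x - l[j] := abs_of_pos (by omega)
      have hcast : ((i : Int) - 1) = ((i - 1 : Nat) : Int) := by omega
      rw [hcast, PySem.List.pyGetD_natCast]
      simp only [Bool.and_eq_true, decide_eq_true_eq]
      refine ⟨h0i, ?_⟩
      rw [List.getD_eq_getElem l 0 hi1]
      omega
    · -- the witness is at or right of x ⇒ the right neighbour l[i] is within distance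
      left
      have hij : i ≤ j := by
        by_contra hni
        exact absurd (hlt j hj (Nat.lt_of_not_le hni)) hjx
      have hiL : i < l.length := by omega
      have hile : l[i] ≤ l[j] := sorted_getElem_le hs hij hj
      have hxi : x ≤ l[i] := hge i hiL (le_refl _)
      have habs : |x - l[j]| = l[j] - x := by
        rw [abs_sub_comm]; exact abs_of_nonneg (by omega)
      rw [PySem.List.pyGetD_natCast]
      simp only [Bool.and_eq_true, decide_eq_true_eq]
      refine ⟨hiL, ?_⟩
      rw [List.getD_eq_getElem l 0 hiL]
      omega
  · simp only [hex, decide_false, Bool.or_eq_false_iff, Bool.and_eq_false_iff]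
    constructor
    · by_cases hiL : i < l.length
      · right
        rw [PySem.List.pyGetD_natCast, List.getD_eq_getElem l 0 hiL]
        have hxi : x ≤ l[i] := hge i hiL (le_refl _)
        have : ¬ (l[i] - x ≤ distance) := by
          intro hcon
          exact hex ⟨l[i], List.getElem_mem hiL, by rw [abs_sub_comm]; rw [abs_of_nonneg (by omega)]; omega⟩
        simpa using this
      · left; simpa using hiL
    · by_cases h0i : 0 < i
      · right
        have hi1 : i - 1 < l.length := by omega
        have hcast : ((i : Int) - 1) = ((i - 1 : Nat) : Int) := by omega
        rw [hcast, PySem.List.pyGetD_natCast, List.getD_eq_getElem l 0 hi1]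
        have hlt1 : l[i-1] < x := hlt (i-1) hi1 (by omega)
        have : ¬ (x - l[i-1] ≤ distance) := by
          intro hcon
          exact hex ⟨l[i-1], List.getElem_mem hi1, by rw [abs_of_pos (by omega)]; omega⟩
        simpa using this
      · left; simpa using h0i

-- inserting at the bisection point keeps the center list sorted
theorem insert_bisect_sorted (l : List Int) (x : Int)
    (hs : List.Pairwise (· ≤ ·) l) :
    List.Pairwise (· ≤ ·) (PySem.List.insert l ((PySem.List.bisectLeft l x : Nat) : Int) x) := by
  obtain ⟨hle, hlt, hge⟩ := PySem.List.bisectLeft_spec l x hs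
  set i := PySem.List.bisectLeft l x with hidef
  rw [PySem.List.insert_natCast l i x hle]
  have htake : List.Pairwise (· ≤ ·) (l.take i) := hs.sublist (List.take_sublist i l)
  have hdrop : List.Pairwise (· ≤ ·) (l.drop i) := hs.sublist (List.drop_sublist i l)
  rw [List.pairwise_append]
  refine ⟨htake, ?_, ?_⟩
  · rw [List.pairwise_cons]
    refine ⟨?_, hdrop⟩
    intro a ha
    obtain ⟨k, hk, rfl⟩ := List.mem_iff_getElem.mp ha
    have hgd : (l.drop i)[k] = l[i+k]'(by simp at hk; omega) := by
      rw [List.getElem_drop]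
    rw [hgd]
    exact hge (i + k) (by simp at hk; omega) (by omega)
  · intro a ha b hb
    obtain ⟨k, hk, rfl⟩ := List.mem_iff_getElem.mp ha
    have hkt : k < i := by simp at hk; omega
    have hkl : k < l.length := by simp at hk; omega
    have hgt : (l.take i)[k] = l[k]'hkl := by rw [List.getElem_take]
    rw [hgt]
    have hax : l[k] < x := hlt k hkl hkt
    rcases List.mem_cons.mp hb with rfl | hb
    · omega
    · obtain ⟨m, hm, rfl⟩ := List.mem_iff_getElem.mp hb
      have hgd : (l.drop i)[m] = l[i+m]'(by simp at hm; omega) := by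
        rw [List.getElem_drop]
      rw [hgd]
      have : x ≤ l[i + m]'(by simp at hm; omega) := hge (i + m) (by simp at hm; omega) (by omega)
      omega

-- membership after inserting at the bisection point
theorem mem_insert_bisect (l : List Int) (x c : Int)
    (hs : List.Pairwise (· ≤ ·) l) :
    c ∈ PySem.List.insert l ((PySem.List.bisectLeft l x : Nat) : Int) x ↔ c = x ∨ c ∈ l := by
  have hle : PySem.List.bisectLeft l x ≤ l.length :=
    (PySem.List.bisectLeft_spec l x hs).1
  rw [PySem.List.insert_natCast l _ x hle]
  constructor
  · intro h
    rcases List.mem_append.mp h with h | h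
    · exact Or.inr ((List.take_subset _ _) h)
    · rcases List.mem_cons.mp h with rfl | h
      · exact Or.inl rfl
      · exact Or.inr ((List.drop_subset _ _) h)
  · intro h
    rcases h with rfl | h
    · exact List.mem_append.mpr (Or.inr (List.mem_cons_self))
    · rw [← List.take_append_drop (PySem.List.bisectLeft l x) l] at h
      rcases List.mem_append.mp h with h | h
      · exact List.mem_append.mpr (Or.inl h)
      · exact List.mem_append.mpr (Or.inr (List.mem_cons_of_mem _ h))

-- the joint loop invariant: equal counts, B's centers sorted and holding the same values as A's
theorem fold_inv (distance : Int) (loc : List (List Int)) :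
    ∀ (la lb : List Int) (cnt : Int),
      List.Pairwise (· ≤ ·) lb → (∀ c, c ∈ la ↔ c ∈ lb) →
      (loc.foldl
        (fun (st : List Int × Int) e =>
          let x := PySem.List.pyGetD e 0 0
          if cfScan x distance st.1 then (st.1 ++ [x], st.2 + 1) else st)
        (la, cnt)).2
      = (loc.foldl
        (fun (st : List Int × Int) e =>
          let x := PySem.List.pyGetD e 0 0
          let centers := st.1
          let i := PySem.List.bisectLeft centers x
          let near := (decide (i < centers.length) && decide (PySem.List.pyGetD centers (i : Int) 0 - x ≤ distance))
                   || (decide (0 < i) && decide (x - PySem.List.pyGetD centers ((i : Int) - 1) 0 ≤ distance))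
          if near then st else (PySem.List.insert centers (i : Int) x, st.2 + 1))
        (lb, cnt)).2 := by
  induction loc with
  | nil => intro la lb cnt hs hmem; rfl
  | cons e t ih =>
      intro la lb cnt hs hmem
      simp only [List.foldl_cons]
      set x := PySem.List.pyGetD e 0 0 with hx
      have hexiff : (∃ c ∈ la, |x - c| ≤ distance) ↔ (∃ c ∈ lb, |x - c| ≤ distance) := by
        constructor
        · rintro ⟨c, hc, hcd⟩; exact ⟨c, (hmem c).mp hc, hcd⟩
        · rintro ⟨c, hc, hcd⟩; exact ⟨c, (hmem c).mpr hc, hcd⟩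
      have hA : cfScan x distance la = !decide (∃ c ∈ lb, |x - c| ≤ distance) := by
        rw [cfScan_eq_decide]
        congr 1
        simp only [decide_eq_decide]
        exact hexiff
      have hB := near_eq_decide x distance lb hs
      simp only [hA, hB]
      by_cases hE : ∃ c ∈ lb, |x - c| ≤ distance
      · simp only [hE, decide_true, Bool.not_true, if_true]
        exact ih la lb cnt hs hmem
      · simp only [hE, decide_false, Bool.not_false, if_true]
        refine ih (la ++ [x]) _ (cnt + 1) (insert_bisect_sorted lb x hs) ?_
        intro c
        rw [mem_insert_bisect lb x c hs, List.mem_append, List.mem_singleton, hmem c]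
        tauto

-- ===== VERDICT (by name: the statement is the Claim_ definition above) =====
theorem cards_filter_spec : Claim_equal_cards_filter := by
  intro location distance _ _
  unfold Spec_cards_filter cards_filter cards_filter_alt
  by_cases hlen : location.length = 0
  · simp only [hlen, if_true]
  · simp only [hlen, if_false]
    exact fold_inv distance location _ _ 1 (List.pairwise_singleton _ _) (fun c => Iff.rfl)
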